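-- pv_equiv track=rewrite | github.com/nestorcastelblanco/Bibliometria_AA | requirement_2/console_report.py | detect_algo
-- ===== SOURCE A (Python) =====
-- from typing import Any, Dict, List, Optional
--
-- PRIMARY_ORDER = [
--     "GTE (coseno)",
--     "SBERT (coseno)",
--     "Coseno (TF-IDF)",
--     "Jaccard (tokens)",
--     "Damerau–Levenshtein (normalizada)",
--     "Levenshtein (normalizada)",
-- ]
--
-- def detect_algo(results: List[Dict[str, Any]], prefer: Optional[str]) -> str:
--     """
--     Detecta o selecciona algoritmo principal para reporte.
--
--     Si el usuario especifica algoritmo y existe en resultados, lo usa.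
--     Si no, selecciona automáticamente según PRIMARY_ORDER.
--
--     Args:
--         results (List[Dict[str, Any]]): Lista de resultados de pares
--         prefer (Optional[str]): Algoritmo preferido por usuario o None
--
--     Returns:
--         str: Nombre del algoritmo seleccionado
--
--     Raises:
--         ValueError: Si no se encuentran algoritmos en resultados
--
--     Estrategia:
--         1. Si prefer especificado y existe: usar ese
--         2. Si no: buscar primer algoritmo de PRIMARY_ORDER presente
--         3. Fallback: primer algoritmo encontrado en cualquier resultado
--         4. Si nada: error
--
--     Example:
--         >>> results = [{"scores": {"GTE (coseno)": 0.8, "Jaccard (tokens)": 0.5}}]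
--         >>> detect_algo(results, None)
--         'GTE (coseno)'
--         >>> detect_algo(results, "Jaccard (tokens)")
--         'Jaccard (tokens)'
--     """
--     if prefer:
--         if any(prefer in r.get("scores", {}) for r in results):
--             return prefer
--     for cand in PRIMARY_ORDER:
--         if any(cand in r.get("scores", {}) for r in results):
--             return cand
--     # fallback
--     for r in results:
--         if r.get("scores"):
--             return list(r["scores"].keys())[0]
--     raise ValueError("No se encontraron algoritmos en los resultados.")
-- ===== SOURCE B (Python) =====
-- from typing import Any, Dict, List, Optional
--
-- PRIMARY_ORDER = [
--     "GTE (coseno)",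
--     "SBERT (coseno)",
--     "Coseno (TF-IDF)",
--     "Jaccard (tokens)",
--     "Damerau–Levenshtein (normalizada)",
--     "Levenshtein (normalizada)",
-- ]
--
-- def detect_algo(results: List[Dict[str, Any]], prefer: Optional[str]) -> str:
--     # Single pass: collect every algorithm name into one set and remember the
--     # very first name seen (the fallback); then answer with O(1) lookups.
--     names = set()
--     fallback = None
--     for r in results:
--         for k in r.get("scores", {}):
--             if fallback is None:
--                 fallback = k
--             names.add(k)
--     if prefer and prefer in names:
--         return prefer
--     for cand in PRIMARY_ORDER:
--         if cand in names:
--             return cand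
--     if fallback is not None:
--         return fallback
--     raise ValueError("No se encontraron algoritmos en los resultados.")
-- ===== Notes on version B (the rewrite author's own statement) =====
-- stated objective: faster
-- what changed: B makes one pass over all results building a set of algorithm names (and recording the first name seen as the fallback), then answers prefer/PRIMARY_ORDER/fallback by O(1) set lookups, instead of A's up-to-seven separate any()-scans over all results plus a fallback scan.
import Mathlib
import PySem

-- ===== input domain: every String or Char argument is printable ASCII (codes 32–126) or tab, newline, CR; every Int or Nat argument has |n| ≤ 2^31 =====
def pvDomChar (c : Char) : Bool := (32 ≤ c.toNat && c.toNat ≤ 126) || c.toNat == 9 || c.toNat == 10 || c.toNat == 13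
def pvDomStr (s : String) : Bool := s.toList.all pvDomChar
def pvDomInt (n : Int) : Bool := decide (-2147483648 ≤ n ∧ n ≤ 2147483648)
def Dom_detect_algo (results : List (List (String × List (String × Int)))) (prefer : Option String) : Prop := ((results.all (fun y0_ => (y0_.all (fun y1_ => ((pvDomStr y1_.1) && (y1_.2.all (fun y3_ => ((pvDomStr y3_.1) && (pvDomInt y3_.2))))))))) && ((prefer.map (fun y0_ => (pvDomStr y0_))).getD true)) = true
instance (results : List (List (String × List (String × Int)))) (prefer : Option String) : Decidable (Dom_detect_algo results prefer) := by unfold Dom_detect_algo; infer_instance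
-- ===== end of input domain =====

-- B replaces A's seven repeated scans of all results by one pass building a name set plus a
-- recorded fallback, then O(1) lookups; return values agree wherever A returns (Pre_ excludes
-- exactly the inputs where both Pythons raise ValueError).

-- ===== PORT A =====
def pvPRIMARY_ORDER : List String :=
  ["GTE (coseno)", "SBERT (coseno)", "Coseno (TF-IDF)", "Jaccard (tokens)",
   "Damerau–Levenshtein (normalizada)", "Levenshtein (normalizada)"]

-- r.get("scores", {})
def pvScoresA (r : List (String × List (String × Int))) : List (String × Int) :=
  PySem.Dict.getD ⟨r⟩ "scores" []

-- any(name in r.get("scores", {}) for r in results)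
def pvAnyHasA (results : List (List (String × List (String × Int)))) (name : String) : Bool :=
  results.any (fun r => (pvScoresA r).any (fun kv => kv.1 == name))

def detect_algo (results : List (List (String × List (String × Int)))) (prefer : Option String) : String :=
  -- if prefer: (truthy = some non-empty string) and present → return prefer
  let hit : Bool := match prefer with
    | some p => p ≠ "" && pvAnyHasA results p
    | none => false
  if hit then
    match prefer with
    | some p => p
    | none => ""  -- unreachable: hit forces prefer = some _
  else
    -- for cand in PRIMARY_ORDER: if any(...): return cand
    match pvPRIMARY_ORDER.find? (fun cand => pvAnyHasA results cand) with
    | some c => c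
    | none =>
      -- fallback: first r with truthy scores, its first key
      match results.find? (fun r => !(pvScoresA r).isEmpty) with
      | some r =>
        match pvScoresA r with
        | (k, _) :: _ => k
        | [] => ""  -- unreachable: find? guarantees non-empty
      | none => ""  -- Python raises ValueError here; excluded by Pre_detect_algo

-- ===== PORT B =====
-- inner loop body: for k in scores: if fallback is None: fallback = k; names.add(k)
def pvStepB (acc : PySem.Set String × Option String) (kv : String × Int) :
    PySem.Set String × Option String :=
  (PySem.Set.add acc.1 kv.1, match acc.2 with | none => some kv.1 | some f => some f)

-- the single build pass over results
def pvBuildB (results : List (List (String × List (String × Int)))) :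
    PySem.Set String × Option String :=
  results.foldl (fun acc r => (PySem.Dict.getD ⟨r⟩ "scores" []).foldl pvStepB acc)
    (PySem.Set.empty, none)

def detect_algo_alt (results : List (List (String × List (String × Int)))) (prefer : Option String) : String :=
  let st := pvBuildB results
  let hit : Bool := match prefer with
    | some p => p ≠ "" && PySem.Set.contains st.1 p
    | none => false
  if hit then
    match prefer with
    | some p => p
    | none => ""  -- unreachable
  else
    match pvPRIMARY_ORDER.find? (fun cand => PySem.Set.contains st.1 cand) with
    | some c => c
    | none =>
      match st.2 with
      | some f => f
      | none => ""  -- Python raises ValueError here; excluded by Pre_detect_algo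

-- ===== PRECONDITION & SPEC =====
-- Pre_ excludes exactly the inputs on which A raises ValueError: no result carries a
-- non-empty "scores" dict (then no algorithm name exists at all).
def Pre_detect_algo (results : List (List (String × List (String × Int)))) (_prefer : Option String) : Prop :=
  ∃ r ∈ results, PySem.Dict.getD ⟨r⟩ "scores" ([] : List (String × Int)) ≠ []
instance (results : List (List (String × List (String × Int)))) (prefer : Option String) : Decidable (Pre_detect_algo results prefer) := by unfold Pre_detect_algo; infer_instance

def pvWitness_detect_algo : (List (List (String × List (String × Int)))) × Option String :=
  ([[("scores", [("GTE (coseno)", 1)])]], none)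

def Spec_detect_algo (results : List (List (String × List (String × Int)))) (prefer : Option String) (out : String) : Prop := out = detect_algo_alt results prefer
instance (results : List (List (String × List (String × Int)))) (prefer : Option String) (out : String) : Decidable (Spec_detect_algo results prefer out) := by unfold Spec_detect_algo; infer_instance

-- ===== CLAIM (what is proved, stated in full; the proofs are below) =====
def Claim_equal_detect_algo : Prop := ∀ (results : List (List (String × List (String × Int)))) (prefer : Option String), Dom_detect_algo results prefer → Pre_detect_algo results prefer → Spec_detect_algo results prefer (detect_algo results prefer)

-- ===== LEMMAS AND PROOFS =====

-- the inner fold only ever grows the name set by the keys of sc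
lemma mem_fst_foldl_stepB (sc : List (String × Int)) :
    ∀ (acc : PySem.Set String × Option String) (x : String),
      x ∈ (sc.foldl pvStepB acc).1 ↔ x ∈ acc.1 ∨ ∃ kv ∈ sc, kv.1 = x := by
  induction sc with
  | nil => simp
  | cons kv rest ih =>
    intro acc x
    simp only [List.foldl_cons, ih, pvStepB, PySem.Set.mem_add, List.mem_cons]
    constructor
    · rintro ((h | h) | ⟨kv', h1, h2⟩)
      · exact Or.inl h
      · exact Or.inr ⟨kv, Or.inl rfl, h.symm⟩
      · exact Or.inr ⟨kv', Or.inr h1, h2⟩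
    · rintro (h | ⟨kv', (rfl | h1), h2⟩)
      · exact Or.inl (Or.inl h)
      · exact Or.inl (Or.inr h2.symm)
      · exact Or.inr ⟨kv', h1, h2⟩

-- the inner fold sets the fallback to the first key of sc, once
lemma snd_foldl_stepB (sc : List (String × Int)) :
    ∀ (acc : PySem.Set String × Option String),
      (sc.foldl pvStepB acc).2 =
        match acc.2 with
        | some f => some f
        | none => sc.head?.map (·.1) := by
  induction sc with
  | nil => intro acc; cases h : acc.2 <;> simp [h]
  | cons kv rest ih =>
    intro acc
    simp only [List.foldl_cons, ih, pvStepB]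
    cases h : acc.2 <;> simp

-- the whole build pass, first component, generalized over the accumulator
lemma mem_fst_build_gen (results : List (List (String × List (String × Int)))) :
    ∀ (acc : PySem.Set String × Option String) (x : String),
      x ∈ (results.foldl (fun acc r => (PySem.Dict.getD ⟨r⟩ "scores" []).foldl pvStepB acc) acc).1 ↔
        x ∈ acc.1 ∨ pvAnyHasA results x = true := by
  induction results with
  | nil => simp [pvAnyHasA]
  | cons r rest ih =>
    intro acc x
    simp only [List.foldl_cons, ih, mem_fst_foldl_stepB, pvAnyHasA, List.any_cons,
      List.any_eq_true, Bool.or_eq_true, beq_iff_eq, pvScoresA]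
    exact or_assoc

-- the whole build pass, second component, generalized over the accumulator
lemma snd_build_gen (results : List (List (String × List (String × Int)))) :
    ∀ (acc : PySem.Set String × Option String),
      (results.foldl (fun acc r => (PySem.Dict.getD ⟨r⟩ "scores" []).foldl pvStepB acc) acc).2 =
        match acc.2 with
        | some f => some f
        | none =>
          (results.find? (fun r => !(pvScoresA r).isEmpty)).bind
            (fun r => (pvScoresA r).head?.map (·.1)) := by
  induction results with
  | nil => intro acc; cases h : acc.2 <;> simp [h]
  | cons r rest ih =>
    intro acc
    simp only [List.foldl_cons, ih, snd_foldl_stepB]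
    cases hacc : acc.2 with
    | some f => simp
    | none =>
      cases hsc : pvScoresA r with
      | nil =>
        have : (PySem.Dict.getD ⟨r⟩ "scores" ([] : List (String × Int))) = [] := hsc
        simp [hsc, this]
      | cons kv tl =>
        have : (PySem.Dict.getD ⟨r⟩ "scores" ([] : List (String × Int))) = kv :: tl := hsc
        simp [hsc, this]

-- membership in the built set = A's repeated any-scan
lemma contains_build (results : List (List (String × List (String × Int)))) (x : String) :
    PySem.Set.contains (pvBuildB results).1 x = pvAnyHasA results x := by
  have h := mem_fst_build_gen results (PySem.Set.empty, none) x
  simp only [PySem.Set.empty, List.not_mem_nil, false_or] at h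
  rw [Bool.eq_iff_iff, PySem.Set.contains_iff]
  unfold pvBuildB
  exact h

-- fallback recorded by the build pass
lemma snd_build (results : List (List (String × List (String × Int)))) :
    (pvBuildB results).2 =
      (results.find? (fun r => !(pvScoresA r).isEmpty)).bind
        (fun r => (pvScoresA r).head?.map (·.1)) := by
  have h := snd_build_gen results (PySem.Set.empty, none)
  simpa using h

-- A's fallback chain equals B's recorded fallback
lemma fallback_eq (results : List (List (String × List (String × Int)))) :
    (match results.find? (fun r => !(pvScoresA r).isEmpty) with
     | some r => (match pvScoresA r with | (k, _) :: _ => k | [] => "")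
     | none => "") =
    (match (results.find? (fun r => !(pvScoresA r).isEmpty)).bind
        (fun r => (pvScoresA r).head?.map (·.1)) with
     | some f => f
     | none => "") := by
  cases hf : results.find? (fun r => !(pvScoresA r).isEmpty) with
  | none => rfl
  | some r =>
    have hp := List.find?_some hf
    cases hsc : pvScoresA r with
    | nil => rw [hsc] at hp; simp at hp
    | cons kv tl => simp [hsc]

-- ===== VERDICT (by name: the statement is the Claim_ definition above) =====
theorem detect_algo_spec : Claim_equal_detect_algo := by
  intro results prefer _ _
  unfold Spec_detect_algo detect_algo detect_algo_alt
  simp only [contains_build, snd_build]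
  have hfb := fallback_eq results
  cases prefer with
  | none =>
    simp only [if_neg Bool.false_ne_true]
    cases pvPRIMARY_ORDER.find? (fun cand => pvAnyHasA results cand) with
    | some c => rfl
    | none => exact hfb
  | some p =>
    by_cases hp : (p ≠ "" && pvAnyHasA results p) = true
    · rw [if_pos hp, if_pos hp]
    · simp only [Bool.not_eq_true] at hp
      simp only [hp, if_neg Bool.false_ne_true]
      cases pvPRIMARY_ORDER.find? (fun cand => pvAnyHasA results cand) with
      | some c => rfl
      | none => exact hfb
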